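-- pv_equiv track=rewrite | github.com/pypi-data/pypi-mirror-403 | packages/structly-whois/structly_whois-1.1.0-py3-none-any.whl/structly_whois/normalization.py | _collapse_wrapped_fields
-- ===== SOURCE A (Python) =====
-- from collections.abc import Iterable, Mapping
--
-- _COLLAPSIBLE_HEADERS = {
--     "domain name:",
--     "registrar:",
--     "registered on:",
--     "registration status:",
--     "expiry date:",
--     "expiration date:",
--     "last updated:",
--     "updated date:",
--     "abuse contact:",
--     "flags:",
-- }
--
-- def _collapse_wrapped_fields(lines: Iterable[str]) -> list[str]:
--     """Collapse "header" lines whose value sits on the next line."""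
--     collapsed: list[str] = []
--     buffer = list(lines)
--     idx = 0
--     total = len(buffer)
--     while idx < total:
--         line = buffer[idx]
--         lower = line.lower()
--         if lower in _COLLAPSIBLE_HEADERS and idx + 1 < total:
--             next_line = buffer[idx + 1]
--             if next_line and ":" not in next_line:
--                 collapsed.append(f"{line} {next_line}")
--                 idx += 2
--                 continue
--         collapsed.append(line)
--         idx += 1
--     return collapsed
-- ===== SOURCE B (Python) =====
-- _COLLAPSIBLE_HEADERS = {
--     "domain name:",
--     "registrar:",
--     "registered on:",
--     "registration status:",
--     "expiry date:",
--     "expiration date:",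
--     "last updated:",
--     "updated date:",
--     "abuse contact:",
--     "flags:",
-- }
--
-- def _collapse_wrapped_fields(lines):
--     """Single pass with a 'pending' header instead of index lookahead."""
--     collapsed = []
--     pending = None
--     for line in lines:
--         if pending is not None:
--             if line and ":" not in line:
--                 collapsed.append(f"{pending} {line}")
--                 pending = None
--                 continue
--             collapsed.append(pending)
--             pending = None
--         if line.lower() in _COLLAPSIBLE_HEADERS:
--             pending = line
--         else:
--             collapsed.append(line)
--     if pending is not None:
--         collapsed.append(pending)
--     return collapsed
-- ===== Notes on version B (the rewrite author's own statement) =====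
-- stated objective: simpler
-- what changed: Replaced A's index-based while-loop with manual lookahead (buffer[idx+1], idx += 2) by a single left fold over the lines that carries a 'pending' header option, flushed after the loop.
import Mathlib
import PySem

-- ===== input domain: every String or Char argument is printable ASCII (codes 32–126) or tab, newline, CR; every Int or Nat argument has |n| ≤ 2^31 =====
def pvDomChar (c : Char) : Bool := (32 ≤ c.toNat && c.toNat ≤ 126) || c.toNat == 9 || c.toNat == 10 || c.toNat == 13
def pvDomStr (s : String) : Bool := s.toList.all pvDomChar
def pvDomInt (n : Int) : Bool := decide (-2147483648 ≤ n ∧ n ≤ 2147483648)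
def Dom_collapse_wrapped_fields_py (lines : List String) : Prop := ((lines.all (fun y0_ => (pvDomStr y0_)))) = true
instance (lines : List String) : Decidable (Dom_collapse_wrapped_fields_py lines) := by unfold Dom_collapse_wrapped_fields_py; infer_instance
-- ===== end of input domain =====

-- B replaces A's index-lookahead while-loop by a single left fold that carries a
-- 'pending' header (objective: simpler decomposition, same linear cost).

-- ===== PORT A =====
-- the module constant _COLLAPSIBLE_HEADERS (a set literal; membership only)
def pvHeaders : List String :=
  ["domain name:", "registrar:", "registered on:", "registration status:",
   "expiry date:", "expiration date:", "last updated:", "updated date:",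
   "abuse contact:", "flags:"]

-- A's while-loop over indices (idx always < total ⇒ getD is the in-range buffer[idx])
def goA (buffer : List String) (total idx : Nat) (collapsed : List String) : List String :=
  if _h : idx < total then
    let line := buffer.getD idx ""
    let lower := PySem.Str.lower line
    if pvHeaders.contains lower ∧ idx + 1 < total then
      let next_line := buffer.getD (idx + 1) ""
      if next_line ≠ "" ∧ PySem.Str.isIn ":" next_line = false then
        goA buffer total (idx + 2) (collapsed ++ [line ++ " " ++ next_line])
      else
        goA buffer total (idx + 1) (collapsed ++ [line])
    else
      goA buffer total (idx + 1) (collapsed ++ [line])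
  else collapsed
termination_by total - idx
decreasing_by all_goals omega

def collapse_wrapped_fields_py (lines : List String) : List String :=
  goA lines lines.length 0 []

-- ===== PORT B =====
-- one fold step: state = (collapsed so far, pending header if any)
def pvStepB (st : List String × Option String) (line : String) : List String × Option String :=
  match st with
  | (collapsed, some pending) =>
    if line ≠ "" ∧ PySem.Str.isIn ":" line = false then
      (collapsed ++ [pending ++ " " ++ line], none)
    else
      let collapsed := collapsed ++ [pending]
      if pvHeaders.contains (PySem.Str.lower line) then (collapsed, some line)
      else (collapsed ++ [line], none)
  | (collapsed, none) =>
    if pvHeaders.contains (PySem.Str.lower line) then (collapsed, some line)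
    else (collapsed ++ [line], none)

def collapse_wrapped_fields_py_alt (lines : List String) : List String :=
  let st := lines.foldl pvStepB ([], none)
  match st.2 with
  | some pending => st.1 ++ [pending]
  | none => st.1

-- ===== PRECONDITION & SPEC =====
def Spec_collapse_wrapped_fields_py (lines : List String) (out : List String) : Prop := out = collapse_wrapped_fields_py_alt lines
instance (lines : List String) (out : List String) : Decidable (Spec_collapse_wrapped_fields_py lines out) := by unfold Spec_collapse_wrapped_fields_py; infer_instance

-- ===== CLAIM (what is proved, stated in full; the proofs are below) =====
def Claim_equal_collapse_wrapped_fields_py : Prop := ∀ (lines : List String), Dom_collapse_wrapped_fields_py lines → Spec_collapse_wrapped_fields_py lines (collapse_wrapped_fields_py lines)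

-- ===== LEMMAS AND PROOFS =====
-- flush of B's final state
def finishB (st : List String × Option String) : List String :=
  match st.2 with
  | some pending => st.1 ++ [pending]
  | none => st.1

lemma key : ∀ (n : Nat) (buffer : List String) (idx : Nat) (acc : List String),
    buffer.length - idx = n →
    goA buffer buffer.length idx acc = finishB ((buffer.drop idx).foldl pvStepB (acc, none)) := by
  intro n
  induction n using Nat.strong_induction_on with
  | _ n IH =>
    intro buffer idx acc hn
    by_cases hlt : idx < buffer.length
    · rw [goA]
      simp only [dif_pos hlt]
      have hl : buffer.getD idx "" = buffer[idx] := List.getD_eq_getElem _ _ hlt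
      rw [List.drop_eq_getElem_cons hlt]
      by_cases hhdr : pvHeaders.contains (PySem.Str.lower (buffer.getD idx "")) = true
        ∧ idx + 1 < buffer.length
      · rw [if_pos hhdr]
        have hn2 : buffer.getD (idx+1) "" = buffer[idx+1] := List.getD_eq_getElem _ _ hhdr.2
        rw [List.drop_eq_getElem_cons hhdr.2]
        by_cases hval : buffer.getD (idx+1) "" ≠ "" ∧ PySem.Str.isIn ":" (buffer.getD (idx+1) "") = false
        · rw [if_pos hval]
          rw [IH (buffer.length - (idx+2)) (by omega) buffer (idx+2) _ rfl]
          simp only [List.foldl_cons, pvStepB, ← hl, ← hn2, if_pos hhdr.1, if_pos hval]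
        · rw [if_neg hval]
          rw [IH (buffer.length - (idx+1)) (by omega) buffer (idx+1) _ rfl]
          rw [List.drop_eq_getElem_cons hhdr.2]
          simp only [List.foldl_cons, pvStepB, ← hl, ← hn2, if_pos hhdr.1, if_neg hval]
      · rw [if_neg hhdr]
        rw [IH (buffer.length - (idx+1)) (by omega) buffer (idx+1) _ rfl]
        by_cases hh : pvHeaders.contains (PySem.Str.lower (buffer.getD idx "")) = true
        · -- header at the very last index: pending is set then immediately flushed
          have hlast : ¬ idx + 1 < buffer.length := fun hc => hhdr ⟨hh, hc⟩
          have hdrop : buffer.drop (idx + 1) = [] := List.drop_eq_nil_of_le (by omega)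
          rw [hdrop]
          simp only [List.foldl_cons, pvStepB, ← hl, if_pos hh, List.foldl_nil, finishB]
        · simp only [List.foldl_cons, pvStepB, ← hl, if_neg hh]
    · rw [goA, dif_neg hlt]
      have hdrop : buffer.drop idx = [] := List.drop_eq_nil_of_le (by omega)
      simp [hdrop, finishB]

-- ===== VERDICT (by name: the statement is the Claim_ definition above) =====
theorem collapse_wrapped_fields_py_spec : Claim_equal_collapse_wrapped_fields_py := by
  intro lines _
  unfold Spec_collapse_wrapped_fields_py collapse_wrapped_fields_py collapse_wrapped_fields_py_alt
  rw [key lines.length lines 0 [] rfl]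
  simp [finishB]
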